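-- pv_equiv track=rewrite | github.com/Klaudia1303/student_code_analysis | Progetto-tirocinio2024/data/student_data/2080992_Medici/LabPython08/A_Ex5.py | A_Ex5
-- ===== SOURCE A (Python) =====
-- def A_Ex5(a,b):
--     insieme=set()
--     lA=list(a)
--     lB=list(b)
--     l=[]
--     for i in range(len(lA)):
--         lAt=list(lA[i])
--         for j in range(len(lB)):
--             lBt=list(lB[j])
--             if lBt[0]==lAt[1]:
--                 t= lAt[0], lBt[1]
--                 l.append(t)
--     insieme=set(l)
--     return insieme
-- ===== SOURCE B (Python) =====
-- def A_Ex5(a, b):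
--     index = {}
--     for y, w in b:
--         index.setdefault(y, []).append(w)
--     out = []
--     for x, y in a:
--         for w in index.get(y, []):
--             out.append((x, w))
--     return set(out)
-- ===== Notes on version B (the rewrite author's own statement) =====
-- stated objective: faster
-- what changed: Replaces the nested scan of b for every pair of a with a dict grouping b's second components by first element, built once, so the join is a lookup per a-pair.
import Mathlib
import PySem

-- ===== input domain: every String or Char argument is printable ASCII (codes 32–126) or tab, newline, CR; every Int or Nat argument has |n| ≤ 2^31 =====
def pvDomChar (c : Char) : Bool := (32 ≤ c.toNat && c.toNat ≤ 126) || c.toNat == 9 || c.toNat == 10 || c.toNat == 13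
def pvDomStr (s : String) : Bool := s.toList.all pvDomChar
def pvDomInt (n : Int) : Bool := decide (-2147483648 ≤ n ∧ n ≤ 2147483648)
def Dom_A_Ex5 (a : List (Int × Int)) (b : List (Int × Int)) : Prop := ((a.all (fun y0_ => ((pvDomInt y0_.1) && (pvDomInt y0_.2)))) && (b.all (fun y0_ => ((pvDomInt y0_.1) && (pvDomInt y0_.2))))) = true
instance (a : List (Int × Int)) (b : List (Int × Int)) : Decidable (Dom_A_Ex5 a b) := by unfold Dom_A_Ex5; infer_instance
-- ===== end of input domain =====

-- B builds a dict grouping b's second components by first element once, replacing A's nested scan of b per a-pair (objective: faster, asymptotic).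

-- ===== PORT A =====
def A_Ex5 (a : List (Int × Int)) (b : List (Int × Int)) : List (Int × Int) :=
  let lA := a
  let lB := b
  let l : List (Int × Int) :=
    (PySem.List.pyRange 0 (PySem.List.len lA) 1).foldl (fun l i =>
      let lAt := PySem.List.pyGetD lA i (0, 0)
      (PySem.List.pyRange 0 (PySem.List.len lB) 1).foldl (fun l j =>
        let lBt := PySem.List.pyGetD lB j (0, 0)
        if lBt.1 == lAt.2 then l ++ [(lAt.1, lBt.2)] else l) l) []
  PySem.Set.ofList l

-- ===== PORT B =====
def A_Ex5_alt (a : List (Int × Int)) (b : List (Int × Int)) : List (Int × Int) :=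
  let index : PySem.Dict Int (List Int) :=
    b.foldl (fun d p => d.modify p.1 [] (· ++ [p.2])) PySem.Dict.empty
  let out : List (Int × Int) :=
    a.foldl (fun l p => (index.getD p.2 []).foldl (fun l w => l ++ [(p.1, w)]) l) []
  PySem.Set.ofList out

-- ===== PRECONDITION & SPEC =====
def Spec_A_Ex5 (a : List (Int × Int)) (b : List (Int × Int)) (out : List (Int × Int)) : Prop := out = A_Ex5_alt a b
instance (a : List (Int × Int)) (b : List (Int × Int)) (out : List (Int × Int)) : Decidable (Spec_A_Ex5 a b out) := by unfold Spec_A_Ex5; infer_instance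

-- ===== CLAIM (what is proved, stated in full; the proofs are below) =====
def Claim_equal_A_Ex5 : Prop := ∀ (a : List (Int × Int)) (b : List (Int × Int)), Dom_A_Ex5 a b → Spec_A_Ex5 a b (A_Ex5 a b)

-- ===== LEMMAS AND PROOFS =====

-- the common join list: for each a-pair (x, y), all (x, w) with (y, w) in b, in order
def pvJoin (a b : List (Int × Int)) : List (Int × Int) :=
  a.flatMap (fun p => (b.filter (fun q => q.1 == p.2)).map (fun q => (p.1, q.2)))

theorem inner_A (b : List (Int × Int)) (p : Int × Int) (l : List (Int × Int)) :
    (PySem.List.pyRange 0 (PySem.List.len b) 1).foldl (fun l j =>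
        if (PySem.List.pyGetD b j ((0 : Int), (0 : Int))).1 == p.2 then
          l ++ [(p.1, (PySem.List.pyGetD b j ((0 : Int), (0 : Int))).2)]
        else l) l
    = l ++ (b.filter (fun q => q.1 == p.2)).map (fun q => (p.1, q.2)) := by
  simp only [PySem.List.len_eq]
  rw [PySem.List.foldl_pyRange_pyGetD' b ((0 : Int), (0 : Int))
      (fun l q => if q.1 == p.2 then l ++ [(p.1, q.2)] else l) l (by norm_num)]
  simp only [Int.toNat_zero, List.drop_zero]
  exact PySem.List.foldl_append_if _ _ b l

theorem A_list_eq (a b : List (Int × Int)) :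
    (PySem.List.pyRange 0 (PySem.List.len a) 1).foldl (fun l i =>
      let lAt := PySem.List.pyGetD a i ((0 : Int), (0 : Int))
      (PySem.List.pyRange 0 (PySem.List.len b) 1).foldl (fun l j =>
        let lBt := PySem.List.pyGetD b j ((0 : Int), (0 : Int))
        if lBt.1 == lAt.2 then l ++ [(lAt.1, lBt.2)] else l) l) [] = pvJoin a b := by
  simp only [inner_A]
  simp only [PySem.List.len_eq]
  rw [PySem.List.foldl_pyRange_pyGetD' a ((0 : Int), (0 : Int))
      (fun l (p : Int × Int) => l ++ (b.filter (fun q => q.1 == p.2)).map (fun q => (p.1, q.2)))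
      [] (by norm_num)]
  simp only [Int.toNat_zero, List.drop_zero]
  rw [PySem.List.foldl_append_eq_flatMap]
  rfl

theorem B_list_eq (a b : List (Int × Int)) :
    a.foldl (fun l p =>
      ((b.foldl (fun d p => d.modify p.1 [] (· ++ [p.2])) PySem.Dict.empty).getD p.2 []).foldl
        (fun l w => l ++ [(p.1, w)]) l) [] = pvJoin a b := by
  simp only [PySem.List.foldl_append_singleton_eq_map, PySem.Dict.getD_foldl_modify_append,
    PySem.Dict.getD_empty, List.map_map, List.nil_append]
  rw [PySem.List.foldl_append_eq_flatMap]
  rfl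

-- ===== VERDICT (by name: the statement is the Claim_ definition above) =====
theorem A_Ex5_spec : Claim_equal_A_Ex5 := by
  intro a b _
  show PySem.Set.ofList _ = PySem.Set.ofList _
  rw [A_list_eq, B_list_eq]
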